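-- pv_equiv track=rewrite | github.com/gtsherman/entities-experiments | src/oracle.py | shortest_distinct_file
-- ===== SOURCE A (Python) =====
-- def shortest_distinct_file(fname, files):
-- 	sname = file_only(fname)
-- 	num_match = 0
-- 	for f in files:
-- 		num_match += 1 if file_only(f) == sname else 0
-- 		if num_match > 1:
-- 			return fname
-- 	return sname
--
-- def file_only(fname):
-- 	return fname.split('/')[-1].strip()
-- ===== SOURCE B (Python) =====
-- def shortest_distinct_file(fname, files):
-- 	seen = set()
-- 	dups = set()
-- 	for f in files:
-- 		b = file_only(f)
-- 		if b in seen: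
-- 			dups.add(b)
-- 		else:
-- 			seen.add(b)
-- 	sname = file_only(fname)
-- 	return fname if sname in dups else sname
--
-- def file_only(fname):
-- 	return fname.split('/')[-1].strip()
-- ===== Notes on version B (the rewrite author's own statement) =====
-- stated objective: alternative
-- what changed: Replaces A's scalar accumulate-with-early-return counting loop by a set-based duplicate detector: one pass builds a 'seen' set and a 'dups' set of basenames appearing at least twice, and the answer is a single membership test of fname's basename in 'dups'.
import Mathlib
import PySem

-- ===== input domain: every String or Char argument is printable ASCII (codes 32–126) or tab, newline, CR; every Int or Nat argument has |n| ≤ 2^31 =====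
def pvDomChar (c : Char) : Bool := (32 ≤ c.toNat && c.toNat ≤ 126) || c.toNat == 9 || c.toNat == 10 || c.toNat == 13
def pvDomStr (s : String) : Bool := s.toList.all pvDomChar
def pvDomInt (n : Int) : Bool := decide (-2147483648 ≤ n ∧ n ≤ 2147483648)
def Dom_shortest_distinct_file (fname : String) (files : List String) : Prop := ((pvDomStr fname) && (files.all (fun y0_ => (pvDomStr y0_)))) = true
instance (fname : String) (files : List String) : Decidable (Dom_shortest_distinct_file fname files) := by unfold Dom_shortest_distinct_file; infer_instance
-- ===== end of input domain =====

-- B replaces A's count-and-early-return loop by a set-based duplicate detector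
-- (seen/dups sets, then one membership test); objective: alternative. Both total.

-- ===== PORT A =====
-- file_only(fname) = fname.split('/')[-1].strip(); split('/') is never empty, so [-1] is getLast
def pvFileOnly (fname : String) : String :=
  String.ofList (PySem.Chars.strip ((PySem.Chars.splitOn fname.toList "/".toList).getLast?.getD []))

def pvLoopA (fname sname : String) (num_match : Int) (files : List String) : String :=
  match files with
  | [] => sname
  | f :: rest =>
    let nm := num_match + (if pvFileOnly f == sname then 1 else 0)
    if nm > 1 then fname else pvLoopA fname sname nm rest

def shortest_distinct_file (fname : String) (files : List String) : String :=
  pvLoopA fname (pvFileOnly fname) 0 files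

-- ===== PORT B =====
-- one pass building the 'seen' and 'dups' sets, then a membership test
def pvLoopB (seen dups : PySem.Set String) (files : List String) : PySem.Set String :=
  match files with
  | [] => dups
  | f :: rest =>
    let b := pvFileOnly f
    if PySem.Set.contains seen b then pvLoopB seen (PySem.Set.add dups b) rest
    else pvLoopB (PySem.Set.add seen b) dups rest

def shortest_distinct_file_alt (fname : String) (files : List String) : String :=
  let dups := pvLoopB PySem.Set.empty PySem.Set.empty files
  let sname := pvFileOnly fname
  if PySem.Set.contains dups sname then fname else sname

-- ===== PRECONDITION & SPEC =====
def Spec_shortest_distinct_file (fname : String) (files : List String) (out : String) : Prop := out = shortest_distinct_file_alt fname files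
instance (fname : String) (files : List String) (out : String) : Decidable (Spec_shortest_distinct_file fname files out) := by unfold Spec_shortest_distinct_file; infer_instance

-- ===== CLAIM (what is proved, stated in full; the proofs are below) =====
def Claim_equal_shortest_distinct_file : Prop := ∀ (fname : String) (files : List String), Dom_shortest_distinct_file fname files → Spec_shortest_distinct_file fname files (shortest_distinct_file fname files)

-- ===== LEMMAS AND PROOFS =====

-- A's loop, started with at most one match seen so far, returns fname exactly when the
-- total number of matching basenames (seen + remaining) exceeds 1.
theorem pvLoopA_eq (fname sname : String) (files : List String) :
    ∀ n : Int, n ≤ 1 →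
      pvLoopA fname sname n files =
        if n + ((files.map pvFileOnly).count sname : Int) > 1 then fname else sname := by
  induction files with
  | nil =>
    intro n hn
    simp only [pvLoopA, List.map_nil, List.count_nil, Nat.cast_zero, add_zero]
    rw [if_neg (by omega)]
  | cons f rest ih =>
    intro n hn
    have hcnt : (0:Int) ≤ ((rest.map pvFileOnly).count sname : Int) := Int.natCast_nonneg _
    by_cases hb : pvFileOnly f == sname
    · simp only [pvLoopA, List.map_cons, List.count_cons, hb, if_true]
      by_cases h2 : n + 1 > 1
      · rw [if_pos h2, if_pos (by push_cast; omega)]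
      · rw [if_neg h2, ih (n + 1) (by omega)]
        push_cast
        split_ifs <;> first | rfl | omega
    · simp only [pvLoopA, List.map_cons, List.count_cons, hb, Bool.false_eq_true,
        if_false, add_zero]
      rw [if_neg (by omega), ih n hn]

-- B's loop invariant: x ends up in the dups set iff it was already there, or it was in
-- 'seen' and occurs among the remaining basenames, or it occurs twice among them.
theorem mem_pvLoopB (x : String) (files : List String) :
    ∀ seen dups : PySem.Set String,
      x ∈ pvLoopB seen dups files ↔
        x ∈ dups ∨ (x ∈ seen ∧ x ∈ files.map pvFileOnly) ∨
          2 ≤ (files.map pvFileOnly).count x := by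
  induction files with
  | nil => intro seen dups; simp [pvLoopB]
  | cons f rest ih =>
    intro seen dups
    have hm : x ∈ rest.map pvFileOnly ↔ 1 ≤ (rest.map pvFileOnly).count x := by
      rw [← List.count_pos_iff]; omega
    simp only [pvLoopB, List.map_cons]
    by_cases hs : PySem.Set.contains seen (pvFileOnly f)
    · have hseen : pvFileOnly f ∈ seen := (PySem.Set.contains_iff _ _).mp hs
      rw [if_pos hs, ih, PySem.Set.mem_add, List.mem_cons, List.count_cons]
      by_cases hx : pvFileOnly f = x
      · rw [if_pos (by simp [hx])]
        have hx' : x = pvFileOnly f := hx.symm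
        have hxseen : x ∈ seen := hx ▸ hseen
        constructor
        · intro _; exact Or.inr (Or.inl ⟨hxseen, Or.inl hx'⟩)
        · intro _; exact Or.inl (Or.inr hx')
      · have hx' : ¬ x = pvFileOnly f := fun h => hx h.symm
        rw [if_neg (by simp [hx]), Nat.add_zero]
        constructor
        · rintro ((h | h) | ⟨h1, h2⟩ | h)
          · exact Or.inl h
          · exact absurd h hx'
          · exact Or.inr (Or.inl ⟨h1, Or.inr h2⟩)
          · exact Or.inr (Or.inr h)
        · rintro (h | ⟨h1, (h2 | h2)⟩ | h)
          · exact Or.inl (Or.inl h)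
          · exact absurd h2 hx'
          · exact Or.inr (Or.inl ⟨h1, h2⟩)
          · exact Or.inr (Or.inr h)
    · have hseen : pvFileOnly f ∉ seen := fun h => hs ((PySem.Set.contains_iff _ _).mpr h)
      rw [if_neg hs, ih, PySem.Set.mem_add, List.mem_cons, List.count_cons]
      by_cases hx : pvFileOnly f = x
      · rw [if_pos (by simp [hx])]
        have hxne : x ∉ seen := hx ▸ hseen
        constructor
        · rintro (h | ⟨_, h⟩ | h)
          · exact Or.inl h
          · have := hm.mp h; right; right; omega
          · right; right; omega
        · rintro (h | ⟨h, _⟩ | h)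
          · exact Or.inl h
          · exact absurd h hxne
          · rcases Nat.lt_or_ge ((rest.map pvFileOnly).count x) 1 with h1 | h1
            · omega
            · right; left; exact ⟨Or.inr hx.symm, hm.mpr h1⟩
      · have hx' : ¬ x = pvFileOnly f := fun h => hx h.symm
        rw [if_neg (by simp [hx]), Nat.add_zero]
        constructor
        · rintro (h | ⟨(h1 | h1), h2⟩ | h)
          · exact Or.inl h
          · exact Or.inr (Or.inl ⟨h1, Or.inr h2⟩)
          · exact absurd h1 hx'
          · exact Or.inr (Or.inr h)
        · rintro (h | ⟨h1, (h2 | h2)⟩ | h)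
          · exact Or.inl h
          · exact absurd h2 hx'
          · exact Or.inr (Or.inl ⟨Or.inl h1, h2⟩)
          · exact Or.inr (Or.inr h)

-- ===== VERDICT (by name: the statement is the Claim_ definition above) =====
theorem shortest_distinct_file_spec : Claim_equal_shortest_distinct_file := by
  intro fname files _
  unfold Spec_shortest_distinct_file shortest_distinct_file shortest_distinct_file_alt
  rw [pvLoopA_eq fname (pvFileOnly fname) files 0 (by omega)]
  simp only [zero_add]
  have hmem : (PySem.Set.contains (pvLoopB PySem.Set.empty PySem.Set.empty files)
      (pvFileOnly fname) = true) ↔ 2 ≤ (files.map pvFileOnly).count (pvFileOnly fname) := by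
    rw [PySem.Set.contains_iff, mem_pvLoopB]
    simp [PySem.Set.empty]
  by_cases h : 2 ≤ (files.map pvFileOnly).count (pvFileOnly fname)
  · rw [if_pos (by exact_mod_cast (by omega : (1:Int) < ((files.map pvFileOnly).count (pvFileOnly fname) : Int)))]
    rw [if_pos (hmem.mpr h)]
  · rw [if_neg (by omega), if_neg (by rw [hmem]; omega)]
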